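-- pv_equiv track=rewrite | github.com/tarunyadav0204/Astrology | backend/ai/base_ai_context_generator.py | _get_house_lordships
-- ===== SOURCE A (Python) =====
-- from typing import Dict, Any, Optional
--
-- def _get_house_lordships(ascendant_sign: int) -> Dict:
--     """Get house lordships based on ascendant sign"""
--     # Sign lordships (0=Aries, 1=Taurus, etc.)
--     sign_lords = {
--         0: 'Mars', 1: 'Venus', 2: 'Mercury', 3: 'Moon', 4: 'Sun', 5: 'Mercury',
--         6: 'Venus', 7: 'Mars', 8: 'Jupiter', 9: 'Saturn', 10: 'Saturn', 11: 'Jupiter'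
--     }
--
--     house_lordships = {}
--     for house in range(1, 13):
--         # Calculate which sign rules this house
--         house_sign = (ascendant_sign + house - 1) % 12
--         lord = sign_lords[house_sign]
--
--         if lord not in house_lordships:
--             house_lordships[lord] = []
--         house_lordships[lord].append(house)
--
--     return house_lordships
-- ===== SOURCE B (Python) =====
-- def _get_house_lordships(ascendant_sign: int) -> dict:
--     """Get house lordships based on ascendant sign (inverse-table decomposition)."""
--     lord_to_signs = {
--         'Mars': [0, 7], 'Venus': [1, 6], 'Mercury': [2, 5], 'Moon': [3],
--         'Sun': [4], 'Jupiter': [8, 11], 'Saturn': [9, 10],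
--     }
--     entries = {lord: sorted((sign - ascendant_sign) % 12 + 1 for sign in signs)
--                for lord, signs in lord_to_signs.items()}
--     return dict(sorted(entries.items(), key=lambda kv: kv[1][0]))
-- ===== Notes on version B (the rewrite author's own statement) =====
-- stated objective: simpler
-- what changed: Inverts the control flow: instead of iterating houses 1..12 and appending into a dict, B uses a fixed inverse table planet->ruled signs, maps each sign back to a house with (sign - ascendant_sign) % 12 + 1, and orders the entries by first house.
import Mathlib
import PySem

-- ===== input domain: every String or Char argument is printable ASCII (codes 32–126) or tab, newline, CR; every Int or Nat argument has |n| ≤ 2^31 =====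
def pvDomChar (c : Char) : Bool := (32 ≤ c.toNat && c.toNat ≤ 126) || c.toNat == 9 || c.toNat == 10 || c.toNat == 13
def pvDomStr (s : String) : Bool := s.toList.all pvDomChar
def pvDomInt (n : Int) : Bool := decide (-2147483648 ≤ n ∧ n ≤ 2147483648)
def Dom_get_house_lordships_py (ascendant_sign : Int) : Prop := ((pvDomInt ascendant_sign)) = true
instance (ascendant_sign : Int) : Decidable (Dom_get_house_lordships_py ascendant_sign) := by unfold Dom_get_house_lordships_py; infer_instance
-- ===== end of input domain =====

-- B inverts the loop: a fixed planet→signs table is mapped to houses and ordered by first house (objective: simpler decomposition).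

-- ===== PORT A =====
def pvSignLords : PySem.Dict Int String :=
  PySem.Dict.ofList [(0, "Mars"), (1, "Venus"), (2, "Mercury"), (3, "Moon"), (4, "Sun"),
    (5, "Mercury"), (6, "Venus"), (7, "Mars"), (8, "Jupiter"), (9, "Saturn"),
    (10, "Saturn"), (11, "Jupiter")]

def get_house_lordships_py (ascendant_sign : Int) : List (String × List Int) :=
  ((PySem.List.pyRange 1 13 1).foldl (fun (hl : PySem.Dict String (List Int)) house =>
    let house_sign := PySem.Int.mod (ascendant_sign + house - 1) 12
    -- sign_lords[house_sign]: house_sign is always 0..11, so the key is present and getD is exact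
    let lord := PySem.Dict.getD pvSignLords house_sign ""
    let hl := if PySem.Dict.contains hl lord then hl else PySem.Dict.insert hl lord []
    PySem.Dict.modify hl lord [] (fun xs => xs ++ [house])) PySem.Dict.empty).items

-- ===== PORT B =====
def pvLordToSigns : List (String × List Int) :=
  [("Mars", [0, 7]), ("Venus", [1, 6]), ("Mercury", [2, 5]), ("Moon", [3]),
   ("Sun", [4]), ("Jupiter", [8, 11]), ("Saturn", [9, 10])]

def get_house_lordships_py_alt (ascendant_sign : Int) : List (String × List Int) :=
  let entries := pvLordToSigns.map (fun kv =>
    (kv.1, PySem.List.sorted (kv.2.map (fun sign => PySem.Int.mod (sign - ascendant_sign) 12 + 1)) (fun x => x) false))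
  PySem.List.sorted entries (fun kv => (PySem.List.pyGet? kv.2 0).getD 0) false

-- ===== PRECONDITION & SPEC =====
def Spec_get_house_lordships_py (ascendant_sign : Int) (out : List (String × List Int)) : Prop := out = get_house_lordships_py_alt ascendant_sign
instance (ascendant_sign : Int) (out : List (String × List Int)) : Decidable (Spec_get_house_lordships_py ascendant_sign out) := by unfold Spec_get_house_lordships_py; infer_instance

-- ===== CLAIM (what is proved, stated in full; the proofs are below) =====
def Claim_equal_get_house_lordships_py : Prop := ∀ (ascendant_sign : Int), Dom_get_house_lordships_py ascendant_sign → Spec_get_house_lordships_py ascendant_sign (get_house_lordships_py ascendant_sign)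

-- ===== LEMMAS AND PROOFS =====
theorem get_house_lordships_py_congr (a b : Int) (h : PySem.Int.mod a 12 = PySem.Int.mod b 12) :
    get_house_lordships_py a = get_house_lordships_py b := by
  have key : ∀ k : Int, PySem.Int.mod (a + k - 1) 12 = PySem.Int.mod (b + k - 1) 12 := by
    intro k
    have e : ∀ x : Int, PySem.Int.mod x 12 = x % 12 :=
      fun x => PySem.Int.mod_eq_emod_of_pos (by norm_num)
    simp only [e] at *
    omega
  unfold get_house_lordships_py
  simp only [key]

theorem get_house_lordships_py_alt_congr (a b : Int) (h : PySem.Int.mod a 12 = PySem.Int.mod b 12) :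
    get_house_lordships_py_alt a = get_house_lordships_py_alt b := by
  have key : ∀ s : Int, PySem.Int.mod (s - a) 12 = PySem.Int.mod (s - b) 12 := by
    intro s
    have e : ∀ x : Int, PySem.Int.mod x 12 = x % 12 :=
      fun x => PySem.Int.mod_eq_emod_of_pos (by norm_num)
    simp only [e] at *
    omega
  unfold get_house_lordships_py_alt
  simp only [key]

-- ===== VERDICT (by name: the statement is the Claim_ definition above) =====
theorem get_house_lordships_py_spec : Claim_equal_get_house_lordships_py := by
  intro asc _
  unfold Spec_get_house_lordships_py
  rw [get_house_lordships_py_congr asc (PySem.Int.mod asc 12) (by rw [PySem.Int.mod_eq_emod_of_pos (by norm_num), PySem.Int.mod_eq_emod_of_pos (by norm_num)]; omega),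
      get_house_lordships_py_alt_congr asc (PySem.Int.mod asc 12) (by rw [PySem.Int.mod_eq_emod_of_pos (by norm_num), PySem.Int.mod_eq_emod_of_pos (by norm_num)]; omega)]
  have h : PySem.Int.mod asc 12 = 0 ∨ PySem.Int.mod asc 12 = 1 ∨ PySem.Int.mod asc 12 = 2 ∨
      PySem.Int.mod asc 12 = 3 ∨ PySem.Int.mod asc 12 = 4 ∨ PySem.Int.mod asc 12 = 5 ∨
      PySem.Int.mod asc 12 = 6 ∨ PySem.Int.mod asc 12 = 7 ∨ PySem.Int.mod asc 12 = 8 ∨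
      PySem.Int.mod asc 12 = 9 ∨ PySem.Int.mod asc 12 = 10 ∨ PySem.Int.mod asc 12 = 11 := by
    rw [PySem.Int.mod_eq_emod_of_pos (by norm_num)]; omega
  rcases h with h | h | h | h | h | h | h | h | h | h | h | h <;> rw [h] <;> decide
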